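-- pv_equiv track=rewrite | github.com/khadralab/khadralab.github.io | scripts/update_members.py | group_members
-- ===== SOURCE A (Python) =====
-- def group_members(members):
--     groups = {}
--     for m in members:
--         cat = m.get('category', 'Other')
--         groups.setdefault(cat, []).append(m)
--     # preferred order
--     order = [
--         'Visiting Scholars and Postdoctoral Fellows',
--         'PhD Students',
--         "Master's Students",
--         'Undergraduate Students',
--         'Other'
--     ]
--     ordered = {k: groups[k] for k in order if k in groups}
--     for k in groups:
--         if k not in ordered:
--             ordered[k] = groups[k]
--     return ordered
-- ===== SOURCE B (Python) =====
-- def group_members(members):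
--     # Alternative decomposition: never build a dict-of-lists; compute the ordered
--     # category list first, then build each group by filtering members per key.
--     order = [
--         'Visiting Scholars and Postdoctoral Fellows',
--         'PhD Students',
--         "Master's Students",
--         'Undergraduate Students',
--         'Other'
--     ]
--     cats = []
--     for m in members:
--         c = m.get('category', 'Other')
--         if c not in cats:
--             cats.append(c)
--     keys = [k for k in order if k in cats] + [k for k in cats if k not in order]
--     return {k: [m for m in members if m.get('category', 'Other') == k] for k in keys}
-- ===== Notes on version B (the rewrite author's own statement) =====
-- stated objective: alternative
-- what changed: B never builds A's dict-of-lists: it collects the distinct categories in first-encounter order, orders that key list (preferred keys first, leftovers after), and builds each group by filtering the member list per key.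
import Mathlib
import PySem

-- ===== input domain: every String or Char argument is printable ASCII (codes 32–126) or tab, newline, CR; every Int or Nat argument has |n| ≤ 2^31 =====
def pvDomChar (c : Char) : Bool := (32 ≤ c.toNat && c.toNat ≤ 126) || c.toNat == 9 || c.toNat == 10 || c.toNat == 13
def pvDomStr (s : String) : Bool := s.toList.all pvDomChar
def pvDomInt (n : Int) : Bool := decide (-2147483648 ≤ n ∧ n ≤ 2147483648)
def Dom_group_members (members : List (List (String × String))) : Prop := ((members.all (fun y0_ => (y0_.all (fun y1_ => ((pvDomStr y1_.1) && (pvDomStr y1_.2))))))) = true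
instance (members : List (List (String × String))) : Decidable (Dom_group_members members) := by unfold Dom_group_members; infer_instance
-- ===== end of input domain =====

-- B reorders differently: no dict-of-lists grouping pass — distinct categories first, then one filter per key (objective: alternative; return value only).

-- ===== PORT A =====
-- m.get('category', 'Other') on the member dict (assoc list, dict semantics = last write wins, as dict(pairs))
def pvCat (m : List (String × String)) : String := (PySem.Dict.ofList m).getD "category" "Other"

def pvOrder : List String :=
  ["Visiting Scholars and Postdoctoral Fellows", "PhD Students", "Master's Students",
   "Undergraduate Students", "Other"]

-- A's grouping loop: groups.setdefault(cat, []).append(m)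
def pvGroups (members : List (List (String × String))) :
    PySem.Dict String (List (List (String × String))) :=
  members.foldl (fun g m => g.modify (pvCat m) [] (· ++ [m])) PySem.Dict.empty

def group_members (members : List (List (String × String))) :
    List (String × List (List (String × String))) :=
  let groups := pvGroups members
  -- ordered = {k: groups[k] for k in order if k in groups}
  let ordered := pvOrder.foldl
    (fun d k => if groups.contains k then d.insert k (groups.getD k []) else d) PySem.Dict.empty
  -- for k in groups: if k not in ordered: ordered[k] = groups[k]
  let ordered := groups.keys.foldl
    (fun d k => if d.contains k then d else d.insert k (groups.getD k [])) ordered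
  ordered.items

-- ===== PORT B =====
-- B's first pass: distinct categories in first-encounter order (a set kept as a list)
def pvCats (members : List (List (String × String))) : PySem.Set String :=
  members.foldl (fun cs m => PySem.Set.add cs (pvCat m)) PySem.Set.empty

def group_members_alt (members : List (List (String × String))) :
    List (String × List (List (String × String))) :=
  let cats := pvCats members
  let keys := pvOrder.filter (fun k => cats.contains k) ++ cats.filter (fun k => !pvOrder.contains k)
  -- dict comprehension over the distinct keys: insertion order = keys order
  keys.map (fun k => (k, members.filter (fun m => pvCat m == k)))

-- ===== PRECONDITION & SPEC =====
def Spec_group_members (members : List (List (String × String))) (out : List (String × List (List (String × String)))) : Prop := out = group_members_alt members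
instance (members : List (List (String × String))) (out : List (String × List (List (String × String)))) : Decidable (Spec_group_members members out) := by unfold Spec_group_members; infer_instance

-- ===== CLAIM (what is proved, stated in full; the proofs are below) =====
def Claim_equal_group_members : Prop := ∀ (members : List (List (String × String))), Dom_group_members members → Spec_group_members members (group_members members)

-- ===== LEMMAS AND PROOFS =====

-- the grouping dict's value at any key is the filter of members by that category
lemma getD_pvGroups (members : List (List (String × String))) (k : String) :
    (pvGroups members).getD k [] = members.filter (fun m => pvCat m == k) := by
  have h := PySem.Dict.getD_foldl_modify_append (l := members.map (fun m => (pvCat m, m)))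
    (d := PySem.Dict.empty) (c := k)
  rw [List.foldl_map] at h
  unfold pvGroups
  simpa [List.filter_map, List.map_map, Function.comp_def] using h

-- the grouping dict's keys are B's first pass
lemma keys_pvGroups (members : List (List (String × String))) :
    (pvGroups members).keys = pvCats members := by
  unfold pvGroups pvCats
  rw [PySem.Dict.keys_foldl_modify_key members pvCat [] (fun _ m v => v ++ [m])]
  simp [PySem.Dict.keys_empty, PySem.Set.update_nil_left, PySem.Set.ofList_eq_foldl,
    List.foldl_map, PySem.Set.empty]

lemma nodup_keys_pvGroups (members : List (List (String × String))) :
    (pvGroups members).keys.Nodup := by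
  rw [keys_pvGroups]
  unfold pvCats
  rw [show members.foldl (fun cs m => PySem.Set.add cs (pvCat m)) PySem.Set.empty
      = PySem.Set.ofList (members.map pvCat) from by
        simp [PySem.Set.ofList_eq_foldl, List.foldl_map]]
  exact PySem.Set.nodup_ofList _

-- A's second reconstruction loop ('if k not in ordered: ordered[k] = groups[k]') over Nodup keys
lemma foldl_setdefault_items {κ ν : Type} [BEq κ] [LawfulBEq κ]
    (v : κ → ν) (ks : List κ) (hnd : ks.Nodup) (d : PySem.Dict κ ν) :
    (ks.foldl (fun d k => if d.contains k then d else d.insert k (v k)) d).items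
      = d.items ++ (ks.filter (fun k => !d.contains k)).map (fun k => (k, v k)) := by
  induction ks generalizing d with
  | nil => simp
  | cons k ks ih =>
    simp only [List.foldl_cons, List.filter_cons]
    by_cases h : d.contains k = true
    · rw [if_pos h, ih hnd.of_cons d, h]
      simp
    · rw [if_neg h, ih hnd.of_cons (d.insert k (v k))]
      rw [PySem.Dict.items_insert_of_not_contains _ _ (by simpa using h)]
      have hfe : ks.filter (fun j => !(d.insert k (v k)).contains j)
          = ks.filter (fun j => !d.contains j) := by
        apply List.filter_congr
        intro j hj
        have hjk : j ≠ k := fun he => (List.nodup_cons.mp hnd).1 (he ▸ hj)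
        rw [PySem.Dict.contains_insert]
        simp [hjk]
      rw [hfe]
      simp [h]

-- ===== VERDICT (by name: the statement is the Claim_ definition above) =====
theorem group_members_spec : Claim_equal_group_members := by
  intro members _
  show group_members members = group_members_alt members
  unfold group_members group_members_alt
  simp only []
  set G := pvGroups members with hG
  -- first loop: fold over the preferred keys present in groups, all fresh on the empty dict
  have hnodup_filter : (pvOrder.filter (fun k => G.contains k)).Nodup :=
    (by decide : pvOrder.Nodup).filter _
  have h1 : pvOrder.foldl
      (fun d k => if G.contains k then d.insert k (G.getD k []) else d) PySem.Dict.empty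
      = PySem.Dict.mk ((pvOrder.filter (fun k => G.contains k)).map
          (fun k => (k, G.getD k []))) := by
    rw [PySem.List.foldl_if_eq_foldl_filter]
    apply PySem.Dict.ext
    rw [show (fun (d : PySem.Dict String (List (List (String × String)))) k =>
          d.insert k (G.getD k [])) = fun d k => d.insert ((fun x => x) k)
          ((fun x => G.getD x []) k) from rfl]
    rw [PySem.Dict.items_foldl_insert_fresh _ _ _ _
      (fun a _ => by simp [PySem.Dict.contains_empty]) (by simpa using hnodup_filter)]
    simp [PySem.Dict.empty]
  rw [h1]
  -- second loop via the setdefault-items lemma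
  rw [foldl_setdefault_items (fun k => G.getD k []) G.keys (nodup_keys_pvGroups members)]
  -- identify the first dict's items and contains
  have hitems : (PySem.Dict.mk ((pvOrder.filter (fun k => G.contains k)).map
      (fun k => (k, G.getD k [])))).items
      = (pvOrder.filter (fun k => G.contains k)).map (fun k => (k, G.getD k [])) := rfl
  rw [hitems]
  -- contains of the literal first dict, for keys of G
  have hcont : ∀ j ∈ G.keys,
      (PySem.Dict.mk ((pvOrder.filter (fun k => G.contains k)).map
        (fun k => (k, G.getD k [])))).contains j = pvOrder.contains j := by
    intro j hj
    have hjG : G.contains j = true := (PySem.Dict.contains_iff_mem_keys G j).mpr hj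
    rw [PySem.Dict.contains_eq_decide_mem_keys]
    by_cases hjo : j ∈ pvOrder
    · simp [PySem.Dict.keys, List.mem_filter, hjG, hjo]
    · simp [PySem.Dict.keys, List.mem_filter, hjo]
  have hfilt2 : G.keys.filter (fun k =>
      !(PySem.Dict.mk ((pvOrder.filter (fun k => G.contains k)).map
        (fun k => (k, G.getD k [])))).contains k)
      = G.keys.filter (fun k => !pvOrder.contains k) := by
    apply List.filter_congr
    intro j hj
    rw [hcont j hj]
  rw [hfilt2]
  -- both sides are maps over the same key lists
  rw [keys_pvGroups]
  have hkeys : pvOrder.filter (fun k => G.contains k)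
      = pvOrder.filter (fun k => (pvCats members).contains k) := by
    apply List.filter_congr
    intro k _
    rw [hG, PySem.Dict.contains_eq_decide_mem_keys, keys_pvGroups]
    simp
  rw [List.map_append, hkeys]
  have hvals : ∀ (l : List String),
      l.map (fun k => (k, G.getD k []))
        = l.map (fun k => (k, members.filter (fun m => pvCat m == k))) := by
    intro l; apply List.map_congr_left; intro k _; rw [hG, getD_pvGroups]
  rw [hvals, hvals]
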